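-- pv_equiv track=rewrite | github.com/MassimoLauria/adventofcode | 2020/aoc24.py | expandaroundblack
-- ===== SOURCE A (Python) =====
-- DIRS={ 'e'  : (1, 0), 'w'  : (-1,0),
--        'se' : (1,-1), 'ne' : ( 0,1),
--        'sw' : (0,-1), 'nw' : (-1,1)  }
--
-- def expandaroundblack(grid):
--     newgrid={}
--     for x,y in grid:
--         newgrid[x,y]=grid[x,y]
--         if not grid[x,y]:
--             continue
--         for dx,dy in DIRS.values():
--             if (x+dx,y+dy) not in newgrid:
--                 newgrid[x+dx,y+dy]=False
--     return newgrid
-- ===== SOURCE B (Python) =====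
-- DIRS={ 'e'  : (1, 0), 'w'  : (-1,0),
--        'se' : (1,-1), 'ne' : ( 0,1),
--        'sw' : (0,-1), 'nw' : (-1,1)  }
--
-- def expandaroundblack(grid):
--     # pass 1: flatten the work into a stream of coordinates, in first-need order
--     stream = []
--     for key in grid:
--         stream.append(key)
--         if grid[key]:
--             x, y = key
--             for dx, dy in DIRS.values():
--                 stream.append((x + dx, y + dy))
--     # pass 2: ordered dedup of the stream; each kept key gets its grid value (False if new)
--     newgrid = {}
--     for key in stream:
--         if key not in newgrid:
--             newgrid[key] = grid.get(key, False)
--     return newgrid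
-- ===== Notes on version B (the rewrite author's own statement) =====
-- stated objective: alternative
-- what changed: A builds the result dict in one interleaved loop (copy each cell, then conditionally insert its six neighbors against the partially built dict); B decomposes into two passes: flatten all needed coordinates into a stream, then an ordered dedup assigning each new key a single grid lookup (grid value for original cells, False for fresh neighbors).
import Mathlib
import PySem

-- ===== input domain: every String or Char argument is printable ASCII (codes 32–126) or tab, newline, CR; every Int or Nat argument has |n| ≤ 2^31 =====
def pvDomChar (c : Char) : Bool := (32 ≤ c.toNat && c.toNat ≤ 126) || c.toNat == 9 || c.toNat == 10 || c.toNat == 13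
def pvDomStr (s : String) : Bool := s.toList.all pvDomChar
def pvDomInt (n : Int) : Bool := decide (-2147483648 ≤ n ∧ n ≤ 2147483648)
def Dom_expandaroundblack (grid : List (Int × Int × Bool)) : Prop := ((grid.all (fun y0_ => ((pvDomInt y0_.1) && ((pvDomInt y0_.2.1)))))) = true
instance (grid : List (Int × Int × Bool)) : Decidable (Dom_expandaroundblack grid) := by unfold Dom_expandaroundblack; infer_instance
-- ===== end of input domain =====

-- B replaces A's interleaved copy-and-expand dict loop by two passes (flatten the needed
-- coordinates into a stream, then an ordered dedup with one grid lookup per key); same cost.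

-- ===== PORT A =====
def pvDIRS : List (Int × Int) := [(1, 0), (-1, 0), (1, -1), (0, 1), (0, -1), (-1, 1)]

def pvKeyOf (e : Int × Int × Bool) : Int × Int := (e.1, e.2.1)

-- the grid dict as an insertion-ordered association list (first match wins)
def pvToD (grid : List (Int × Int × Bool)) : PySem.Dict (Int × Int) Bool :=
  PySem.Dict.mk (grid.map (fun e => (pvKeyOf e, e.2.2)))

-- one iteration of A's 'for x,y in grid' loop body
def pvStepA (gd : PySem.Dict (Int × Int) Bool) (ng : PySem.Dict (Int × Int) Bool)
    (e : Int × Int × Bool) : PySem.Dict (Int × Int) Bool :=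
  let k := pvKeyOf e
  let v := gd.getD k false                        -- grid[x,y]; the key is always present
  let ng := ng.insert k v                         -- newgrid[x,y] = grid[x,y]
  if v = false then ng                            -- 'if not grid[x,y]: continue'
  else pvDIRS.foldl (fun ng d =>
    if ng.contains (k.1 + d.1, k.2 + d.2) then ng
    else ng.insert (k.1 + d.1, k.2 + d.2) false) ng

def expandaroundblack (grid : List (Int × Int × Bool)) : List (Int × Int × Bool) :=
  let gd := pvToD grid
  let newgrid := grid.foldl (pvStepA gd) PySem.Dict.empty
  newgrid.items.map (fun p => (p.1.1, p.1.2, p.2))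

-- ===== PORT B =====
def pvNbrs (k : Int × Int) : List (Int × Int) := pvDIRS.map (fun d => (k.1 + d.1, k.2 + d.2))

-- pass 1 body: append the key, and its neighbourhood when the cell is black
def pvStepStream (gd : PySem.Dict (Int × Int) Bool) (st : List (Int × Int))
    (e : Int × Int × Bool) : List (Int × Int) :=
  let k := pvKeyOf e
  let st := st ++ [k]
  if gd.getD k false then st ++ pvNbrs k else st

-- pass 2 body: ordered dedup, 'newgrid[key] = grid.get(key, False)' for new keys
def pvStepOut (gd : PySem.Dict (Int × Int) Bool) (out : PySem.Dict (Int × Int) Bool)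
    (k : Int × Int) : PySem.Dict (Int × Int) Bool :=
  if out.contains k then out else out.insert k (gd.getD k false)

def expandaroundblack_alt (grid : List (Int × Int × Bool)) : List (Int × Int × Bool) :=
  let gd := pvToD grid
  let stream := grid.foldl (pvStepStream gd) []
  let out := stream.foldl (pvStepOut gd) PySem.Dict.empty
  out.items.map (fun p => (p.1.1, p.1.2, p.2))

-- ===== PRECONDITION & SPEC =====
def Spec_expandaroundblack (grid : List (Int × Int × Bool)) (out : List (Int × Int × Bool)) : Prop := out = expandaroundblack_alt grid
instance (grid : List (Int × Int × Bool)) (out : List (Int × Int × Bool)) : Decidable (Spec_expandaroundblack grid out) := by unfold Spec_expandaroundblack; infer_instance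

-- ===== CLAIM (what is proved, stated in full; the proofs are below) =====
def Claim_equal_expandaroundblack : Prop := ∀ (grid : List (Int × Int × Bool)), Dom_expandaroundblack grid → Spec_expandaroundblack grid (expandaroundblack grid)

-- ===== LEMMAS AND PROOFS =====

-- the coordinates one grid entry contributes, in A's (and B's) emission order
def pvChunk (gd : PySem.Dict (Int × Int) Bool) (e : Int × Int × Bool) : List (Int × Int) :=
  pvKeyOf e :: (if gd.getD (pvKeyOf e) false then pvNbrs (pvKeyOf e) else [])

-- the value A's dict holds at key j once the entries whose keys form 'seen' are processed
def pvVal (gd : PySem.Dict (Int × Int) Bool) (seen : List (Int × Int)) (j : Int × Int) : Bool :=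
  if j ∈ seen then gd.getD j false else false

-- a dict whose items are a key list paired with a value function
def pvMk (keys : List (Int × Int)) (g : (Int × Int) → Bool) : PySem.Dict (Int × Int) Bool :=
  PySem.Dict.mk (keys.map (fun j => (j, g j)))

lemma pvMk_contains (keys : List (Int × Int)) (g : (Int × Int) → Bool) (k : Int × Int) :
    (pvMk keys g).contains k = decide (k ∈ keys) := by
  rw [PySem.Dict.contains_eq_decide_mem_keys]
  simp [pvMk, PySem.Dict.keys]

lemma pvMk_congr (keys : List (Int × Int)) (g g' : (Int × Int) → Bool)
    (h : ∀ j ∈ keys, g j = g' j) : pvMk keys g = pvMk keys g' := by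
  unfold pvMk
  exact congrArg PySem.Dict.mk (List.map_congr_left (fun j hj => by rw [h j hj]))

lemma pvMk_insert_mem (keys : List (Int × Int)) (g : (Int × Int) → Bool) (k : Int × Int)
    (v : Bool) (hk : k ∈ keys) :
    (pvMk keys g).insert k v = pvMk keys (fun j => if j = k then v else g j) := by
  apply PySem.Dict.ext
  rw [PySem.Dict.items_insert_of_contains _ v (by simp [pvMk_contains, hk])]
  show (List.map (fun j => (j, g j)) keys).map _ = _
  rw [List.map_map]
  exact List.map_congr_left (fun j _ => by by_cases h : j = k <;> simp [h])

lemma pvMk_insert_not_mem (keys : List (Int × Int)) (g : (Int × Int) → Bool) (k : Int × Int)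
    (hk : k ∉ keys) :
    (pvMk keys g).insert k (g k) = pvMk (keys ++ [k]) g := by
  apply PySem.Dict.ext
  rw [PySem.Dict.items_insert_of_not_contains _ _ (by simp [pvMk_contains, hk])]
  simp [pvMk]

lemma pvSet_add_mem {k : Int × Int} {keys : List (Int × Int)} (h : k ∈ keys) :
    PySem.Set.add keys k = keys := by
  simp [PySem.Set.add, PySem.Set.contains, h]

lemma pvSet_add_not_mem {k : Int × Int} {keys : List (Int × Int)} (h : k ∉ keys) :
    PySem.Set.add keys k = keys ++ [k] := by
  simp [PySem.Set.add, PySem.Set.contains, h]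

-- B's second pass: ordered dedup of the stream, values given by the fixed function g
lemma pvOut_loop (gd : PySem.Dict (Int × Int) Bool) (stream : List (Int × Int)) :
    ∀ keys : List (Int × Int),
      stream.foldl (pvStepOut gd) (pvMk keys (fun k => gd.getD k false))
        = pvMk (PySem.Set.update keys stream) (fun k => gd.getD k false) := by
  induction stream with
  | nil => intro keys; simp [PySem.Set.update]
  | cons k stream ih =>
    intro keys
    have hstep : PySem.Set.update keys (k :: stream) = PySem.Set.update (PySem.Set.add keys k) stream := rfl
    rw [List.foldl_cons, hstep]
    by_cases hk : k ∈ keys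
    · rw [show pvStepOut gd (pvMk keys fun k => gd.getD k false) k = pvMk keys (fun k => gd.getD k false) by
        simp [pvStepOut, pvMk_contains, hk], pvSet_add_mem hk]
      exact ih keys
    · rw [show pvStepOut gd (pvMk keys fun k => gd.getD k false) k
          = pvMk (keys ++ [k]) (fun k => gd.getD k false) by
        simp only [pvStepOut, pvMk_contains, hk, decide_false, if_neg Bool.false_ne_true]
        exact pvMk_insert_not_mem keys _ k hk, pvSet_add_not_mem hk]
      exact ih (keys ++ [k])

-- A's inner neighbour loop: conditional inserts of False extend the key list, values untouched
lemma pvNbr_loop (gd : PySem.Dict (Int × Int) Bool) (seen : List (Int × Int))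
    (nbs : List (Int × Int)) :
    ∀ keys : List (Int × Int), (∀ j ∈ seen, j ∈ keys) →
      nbs.foldl (fun ng p => if ng.contains p then ng else ng.insert p false)
          (pvMk keys (pvVal gd seen))
        = pvMk (PySem.Set.update keys nbs) (pvVal gd seen) := by
  induction nbs with
  | nil => intro keys _; simp [PySem.Set.update]
  | cons p nbs ih =>
    intro keys hsub
    have hstep : PySem.Set.update keys (p :: nbs) = PySem.Set.update (PySem.Set.add keys p) nbs := rfl
    rw [List.foldl_cons, hstep]
    by_cases hp : p ∈ keys
    · rw [if_pos (by simp [pvMk_contains, hp]), pvSet_add_mem hp]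
      exact ih keys hsub
    · have hp' : p ∉ seen := fun h => hp (hsub p h)
      rw [if_neg (by simp [pvMk_contains, hp]),
        show (pvMk keys (pvVal gd seen)).insert p false = pvMk (keys ++ [p]) (pvVal gd seen) by
          have h2 := pvMk_insert_not_mem keys (pvVal gd seen) p hp
          rwa [show pvVal gd seen p = false by simp [pvVal, hp']] at h2,
        pvSet_add_not_mem hp]
      exact ih (keys ++ [p]) (fun j hj => List.mem_append_left _ (hsub j hj))

-- A's outer loop: the state is the deduped stream of the processed prefix, each key valued
-- by the grid lookup once its own entry has been processed and False before that
lemma pvA_loop (gd : PySem.Dict (Int × Int) Bool) (rest : List (Int × Int × Bool)) :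
    ∀ (keys seen : List (Int × Int)), (∀ j ∈ seen, j ∈ keys) →
      rest.foldl (pvStepA gd) (pvMk keys (pvVal gd seen))
        = pvMk (PySem.Set.update keys (rest.flatMap (pvChunk gd)))
            (pvVal gd (seen ++ rest.map pvKeyOf)) := by
  induction rest with
  | nil => intro keys seen _; simp [PySem.Set.update]
  | cons e rest ih =>
    intro keys seen hsub
    have hval' : ∀ j, pvVal gd (seen ++ [pvKeyOf e]) j
        = if j = pvKeyOf e then gd.getD j false else pvVal gd seen j := by
      intro j
      by_cases h : j = pvKeyOf e <;> simp [pvVal, h]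
    -- the unconditional insert newgrid[x,y] = grid[x,y]
    have hins : (pvMk keys (pvVal gd seen)).insert (pvKeyOf e) (gd.getD (pvKeyOf e) false)
        = pvMk (PySem.Set.add keys (pvKeyOf e)) (pvVal gd (seen ++ [pvKeyOf e])) := by
      by_cases hk : pvKeyOf e ∈ keys
      · rw [pvMk_insert_mem keys _ _ _ hk, pvSet_add_mem hk]
        exact pvMk_congr _ _ _ (fun j _ => by rw [hval' j]; by_cases h : j = pvKeyOf e <;> simp [h])
      · rw [pvMk_congr keys (pvVal gd seen) (pvVal gd (seen ++ [pvKeyOf e]))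
            (fun j hj => by rw [hval' j, if_neg (fun h : j = pvKeyOf e => hk (by rw [← h]; exact hj))]),
          show gd.getD (pvKeyOf e) false = pvVal gd (seen ++ [pvKeyOf e]) (pvKeyOf e) by
            simp [pvVal],
          pvMk_insert_not_mem _ _ _ hk, pvSet_add_not_mem hk]
    have hsub' : ∀ j ∈ seen ++ [pvKeyOf e], j ∈ PySem.Set.add keys (pvKeyOf e) := by
      intro j hj
      rcases List.mem_append.1 hj with h | h
      · exact (PySem.Set.mem_add _ _ _).2 (Or.inl (hsub j h))
      · exact (PySem.Set.mem_add _ _ _).2 (Or.inr (List.mem_singleton.1 h))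
    rw [List.foldl_cons]
    by_cases hv : gd.getD (pvKeyOf e) false = true
    · -- black cell: key insert, then the six neighbours
      have hnest : pvStepA gd (pvMk keys (pvVal gd seen)) e
          = pvMk (PySem.Set.update (PySem.Set.add keys (pvKeyOf e)) (pvNbrs (pvKeyOf e)))
              (pvVal gd (seen ++ [pvKeyOf e])) := by
        unfold pvStepA
        dsimp only
        rw [hins, if_neg (by simp [hv])]
        exact (List.foldl_map
            (f := fun d : Int × Int => ((pvKeyOf e).1 + d.1, (pvKeyOf e).2 + d.2))
            (g := fun (ng : PySem.Dict (Int × Int) Bool) p =>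
              if ng.contains p then ng else ng.insert p false)
            (l := pvDIRS)
            (init := pvMk (PySem.Set.add keys (pvKeyOf e)) (pvVal gd (seen ++ [pvKeyOf e])))).symm.trans
          (pvNbr_loop gd (seen ++ [pvKeyOf e]) (pvNbrs (pvKeyOf e)) _ hsub')
      rw [hnest, ih _ _ (fun j hj => (PySem.Set.mem_update _ _ _).2 (Or.inl (hsub' j hj)))]
      have hchunk : pvChunk gd e = pvKeyOf e :: pvNbrs (pvKeyOf e) := by
        simp [pvChunk, hv]
      simp only [List.flatMap_cons, hchunk, List.map_cons, List.append_assoc]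
      rw [show PySem.Set.update keys ((pvKeyOf e :: pvNbrs (pvKeyOf e)) ++ rest.flatMap (pvChunk gd))
          = PySem.Set.update (PySem.Set.update (PySem.Set.add keys (pvKeyOf e)) (pvNbrs (pvKeyOf e)))
              (rest.flatMap (pvChunk gd)) by
        simp [PySem.Set.update, List.foldl_append]]
      simp
    · -- white cell: 'continue' after the copy
      have hv' : gd.getD (pvKeyOf e) false = false := by
        cases h : gd.getD (pvKeyOf e) false
        · rfl
        · exact absurd h hv
      have hnest : pvStepA gd (pvMk keys (pvVal gd seen)) e
          = pvMk (PySem.Set.add keys (pvKeyOf e)) (pvVal gd (seen ++ [pvKeyOf e])) := by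
        unfold pvStepA
        dsimp only
        rw [hins, if_pos hv']
      rw [hnest, ih _ _ (fun j hj => hsub' j hj)]
      have hchunk : pvChunk gd e = [pvKeyOf e] := by
        simp [pvChunk, hv']
      simp only [List.flatMap_cons, hchunk, List.map_cons]
      rw [show PySem.Set.update keys ([pvKeyOf e] ++ rest.flatMap (pvChunk gd))
          = PySem.Set.update (PySem.Set.add keys (pvKeyOf e)) (rest.flatMap (pvChunk gd)) by
        simp [PySem.Set.update]]
      simp [List.append_assoc]

-- B's first pass builds exactly the flattened chunk stream
lemma pvStream_loop (gd : PySem.Dict (Int × Int) Bool) (rest : List (Int × Int × Bool)) :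
    ∀ acc : List (Int × Int),
      rest.foldl (pvStepStream gd) acc = acc ++ rest.flatMap (pvChunk gd) := by
  induction rest with
  | nil => intro acc; simp
  | cons e rest ih =>
    intro acc
    rw [List.foldl_cons, ih]
    unfold pvStepStream pvChunk
    by_cases hv : gd.getD (pvKeyOf e) false = true <;> simp [hv]

-- once every entry is processed, A's value function is just the grid lookup (False off-grid)
lemma pvVal_full (grid : List (Int × Int × Bool)) :
    pvVal (pvToD grid) (grid.map pvKeyOf) = fun k => (pvToD grid).getD k false := by
  funext j
  unfold pvVal
  by_cases h : j ∈ grid.map pvKeyOf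
  · rw [if_pos h]
  · rw [if_neg h, PySem.Dict.getD_of_not_contains]
    rw [PySem.Dict.contains_eq_decide_mem_keys]
    simp only [decide_eq_false_iff_not]
    intro hk
    apply h
    simpa [pvToD, PySem.Dict.keys, PySem.Dict.items, List.map_map] using hk

-- ===== VERDICT (by name: the statement is the Claim_ definition above) =====
theorem expandaroundblack_spec : Claim_equal_expandaroundblack := by
  intro grid _
  unfold Spec_expandaroundblack expandaroundblack expandaroundblack_alt
  dsimp only
  have hempty : (PySem.Dict.empty : PySem.Dict (Int × Int) Bool)
      = pvMk [] (pvVal (pvToD grid) []) := rfl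
  rw [hempty, pvA_loop (pvToD grid) grid [] [] (by simp),
    pvStream_loop (pvToD grid) grid [],
    show pvMk [] (pvVal (pvToD grid) []) = pvMk [] (fun k => (pvToD grid).getD k false) from rfl,
    List.nil_append, pvOut_loop (pvToD grid)]
  rw [List.nil_append, pvVal_full]
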